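-- pv_equiv track=rewrite | github.com/samarthpatilML/Shader-Art | sonic_orbits/graphics/scene.py | extract_shader
-- ===== SOURCE A (Python) =====
-- def extract_shader(source, shader_type):
--     start_token = f'#{shader_type}'
--     lines = source.splitlines()
--     collecting = False
--     shader_lines = []
--     for line in lines:
--         if line.strip().startswith(start_token):
--             collecting = True
--             continue
--         if shader_type == 'vertex' and line.strip().startswith('#fragment'):
--             break
--         if collecting:
--             shader_lines.append(line)
--     return '\n'.join(shader_lines)
-- ===== SOURCE B (Python) =====
-- def extract_shader(source, shader_type):
--     start_token = f'#{shader_type}'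
--     lines = source.splitlines()
--     # cutoff: for 'vertex', stop at the first '#fragment' line; otherwise use all lines
--     end_idx = len(lines)
--     if shader_type == 'vertex':
--         for i, l in enumerate(lines):
--             if l.strip().startswith('#fragment'):
--                 end_idx = i
--                 break
--     # first start-token line before the cutoff
--     start_idx = None
--     for i in range(end_idx):
--         if lines[i].strip().startswith(start_token):
--             start_idx = i
--             break
--     if start_idx is None:
--         return ''
--     return '\n'.join(l for l in lines[start_idx + 1:end_idx]
--                      if not l.strip().startswith(start_token))
-- ===== Notes on version B (the rewrite author's own statement) =====
-- stated objective: alternative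
-- what changed: Replaces A's flag-based single-pass state machine (collecting flag + break) with an index-location decomposition: first compute the cutoff index (first '#fragment' line for vertex shaders), then find the start-token line before it, then slice and filter that range.
import Mathlib
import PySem

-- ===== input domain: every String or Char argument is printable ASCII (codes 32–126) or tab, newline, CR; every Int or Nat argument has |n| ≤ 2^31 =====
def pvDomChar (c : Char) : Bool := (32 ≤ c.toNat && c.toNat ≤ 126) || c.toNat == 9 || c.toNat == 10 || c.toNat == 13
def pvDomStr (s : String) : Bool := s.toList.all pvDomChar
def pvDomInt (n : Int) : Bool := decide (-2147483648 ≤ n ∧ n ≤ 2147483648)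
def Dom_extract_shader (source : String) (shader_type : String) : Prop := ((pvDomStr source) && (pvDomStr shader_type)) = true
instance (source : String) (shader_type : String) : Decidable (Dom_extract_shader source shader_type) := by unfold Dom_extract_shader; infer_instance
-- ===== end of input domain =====

-- B replaces A's flag-based single-pass state machine by an index-location-then-slice-and-filter
-- decomposition (objective: alternative structure, same cost).

-- ===== PORT A =====
-- A's for-loop over lines with the 'collecting' flag; returning [] models 'break'.
def extractLoopA (start_token shader_type : String) : List String → Bool → List String
  | [], _ => []
  | line :: rest, collecting =>
    if PySem.Str.startswith (PySem.Str.strip line) start_token then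
      extractLoopA start_token shader_type rest true
    else if shader_type == "vertex" && PySem.Str.startswith (PySem.Str.strip line) "#fragment" then
      []
    else if collecting then
      line :: extractLoopA start_token shader_type rest collecting
    else
      extractLoopA start_token shader_type rest collecting

def extract_shader (source : String) (shader_type : String) : String :=
  -- f'#{shader_type}' (built with String.ofList since String.append is kernel-opaque)
  let start_token := String.ofList ('#' :: shader_type.toList)
  let lines := PySem.Str.splitlines source
  PySem.Str.join "\n" (extractLoopA start_token shader_type lines false)

-- ===== PORT B =====
-- 'for i, l in enumerate(lines): if l.strip().startswith("#fragment"): end_idx = i; break'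
def fragLoopB : List String → Nat → Option Nat
  | [], _ => none
  | l :: rest, i =>
    if PySem.Str.startswith (PySem.Str.strip l) "#fragment" then some i
    else fragLoopB rest (i + 1)

-- 'for i in range(end_idx): if lines[i].strip().startswith(start_token): start_idx = i; break'
def startLoopB (start_token : String) : List String → Nat → Nat → Option Nat
  | [], _, _ => none
  | l :: rest, i, e =>
    if i < e then
      if PySem.Str.startswith (PySem.Str.strip l) start_token then some i
      else startLoopB start_token rest (i + 1) e
    else none

def extract_shader_alt (source : String) (shader_type : String) : String :=
  let start_token := String.ofList ('#' :: shader_type.toList)  -- f'#{shader_type}'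
  let lines := PySem.Str.splitlines source
  let end_idx : Nat :=
    if shader_type == "vertex" then (fragLoopB lines 0).getD lines.length else lines.length
  match startLoopB start_token lines 0 end_idx with
  | none => ""
  | some i =>
    -- lines[start_idx+1:end_idx] with 0 ≤ start_idx+1 and end_idx ≤ len(lines): take-then-drop is exact
    PySem.Str.join "\n"
      (((lines.take end_idx).drop (i + 1)).filter
        (fun l => !(PySem.Str.startswith (PySem.Str.strip l) start_token)))

-- ===== PRECONDITION & SPEC =====
def Spec_extract_shader (source : String) (shader_type : String) (out : String) : Prop := out = extract_shader_alt source shader_type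
instance (source : String) (shader_type : String) (out : String) : Decidable (Spec_extract_shader source shader_type out) := by unfold Spec_extract_shader; infer_instance

-- ===== CLAIM (what is proved, stated in full; the proofs are below) =====
def Claim_equal_extract_shader : Prop := ∀ (source : String) (shader_type : String), Dom_extract_shader source shader_type → Spec_extract_shader source shader_type (extract_shader source shader_type)


-- ===== LEMMAS AND PROOFS =====

lemma fragToList : ("#fragment" : String).toList = ['#','f','r','a','g','m','e','n','t'] := by decide

-- a stripped line starting with '#vertex' cannot also start with '#fragment'
lemma vertex_not_fragment (s : List Char)
    (h : PySem.Chars.startswith s ['#','v','e','r','t','e','x'] = true) :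
    PySem.Chars.startswith s ['#','f','r','a','g','m','e','n','t'] = false := by
  by_contra hf
  rw [Bool.not_eq_false, PySem.Chars.startswith_iff] at hf
  rw [PySem.Chars.startswith_iff] at h
  obtain ⟨t1, e1⟩ := h
  obtain ⟨t2, e2⟩ := hf
  rw [← e1] at e2
  simp at e2

lemma take_findIdx_getD {α : Type} (p : α → Bool) (xs : List α) :
    xs.take ((xs.findIdx? p).getD xs.length) = xs.takeWhile (fun x => !p x) := by
  induction xs with
  | nil => simp
  | cons x rest ih =>
    by_cases hx : p x = true
    · simp only [List.findIdx?_cons, hx, if_true, Option.getD_some, List.take_zero,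
        List.takeWhile_cons, Bool.not_true, Bool.false_eq_true, if_false]
    · have hmap : (Option.map (fun i => i + 1) (rest.findIdx? p)).getD (rest.length + 1)
          = (rest.findIdx? p).getD rest.length + 1 := by
        cases rest.findIdx? p <;> rfl
      simp only [Bool.not_eq_true] at hx
      simp only [List.findIdx?_cons, hx, Bool.false_eq_true, if_false, List.length_cons, hmap,
        List.take_succ_cons, List.takeWhile_cons, Bool.not_false, if_true, ih]

lemma fragLoopB_eq (xs : List String) (i : Nat) :
    fragLoopB xs i =
      (xs.findIdx? (fun l =>
        PySem.Chars.startswith (PySem.Chars.strip l.toList) ['#','f','r','a','g','m','e','n','t'])).map (· + i) := by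
  induction xs generalizing i with
  | nil => simp [fragLoopB]
  | cons l rest ih =>
    by_cases hl : PySem.Chars.startswith (PySem.Chars.strip l.toList) ['#','f','r','a','g','m','e','n','t'] = true
    · simp [fragLoopB, hl, List.findIdx?_cons]
    · simp only [Bool.not_eq_true] at hl
      simp only [fragLoopB, List.findIdx?_cons]
      simp only [PySem.Str.startswith_eq, PySem.Str.toList_strip, fragToList, hl, Bool.false_eq_true, if_false, ih]
      cases rest.findIdx? (fun l =>
          PySem.Chars.startswith (PySem.Chars.strip l.toList) ['#','f','r','a','g','m','e','n','t']) with
      | none => simp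
      | some j => simp only [Option.map_some]; congr 1; omega

lemma startLoopB_eq (st : String) (xs : List String) (i e : Nat) :
    startLoopB st xs i e =
      ((xs.take (e - i)).findIdx? (fun l =>
        PySem.Chars.startswith (PySem.Chars.strip l.toList) st.toList)).map (· + i) := by
  induction xs generalizing i with
  | nil => simp [startLoopB]
  | cons l rest ih =>
    by_cases hie : i < e
    · have h1 : e - i = (e - (i + 1)) + 1 := by omega
      by_cases hl : PySem.Chars.startswith (PySem.Chars.strip l.toList) st.toList = true
      · simp [startLoopB, hie, hl, h1, List.findIdx?_cons]
      · simp only [Bool.not_eq_true] at hl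
        simp only [startLoopB, if_pos hie, h1, List.take_succ_cons, List.findIdx?_cons]
        simp only [PySem.Str.startswith_eq, PySem.Str.toList_strip, fragToList, hl, Bool.false_eq_true, if_false, ih]
        cases (rest.take (e - (i + 1))).findIdx? (fun l =>
            PySem.Chars.startswith (PySem.Chars.strip l.toList) st.toList) with
        | none => simp
        | some j => simp only [Option.map_some]; congr 1; omega
    · have h0 : e - i = 0 := by omega
      simp [startLoopB, hie, h0]

-- A's loop with collecting = true: filter the lines up to the cutoff
lemma loopA_true (st sh : String)
    (compat : (sh == "vertex") = true → ∀ l : String,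
      PySem.Chars.startswith (PySem.Chars.strip l.toList) st.toList = true →
      PySem.Chars.startswith (PySem.Chars.strip l.toList) ['#','f','r','a','g','m','e','n','t'] = false)
    (xs : List String) :
    extractLoopA st sh xs true =
      (xs.takeWhile (fun l => !(sh == "vertex" &&
          PySem.Chars.startswith (PySem.Chars.strip l.toList) ['#','f','r','a','g','m','e','n','t']))).filter
        (fun l => !(PySem.Chars.startswith (PySem.Chars.strip l.toList) st.toList)) := by
  induction xs with
  | nil => simp [extractLoopA]
  | cons l rest ih =>
    simp only [extractLoopA]
    simp only [PySem.Str.startswith_eq, PySem.Str.toList_strip, fragToList, List.takeWhile_cons]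
    by_cases hP : PySem.Chars.startswith (PySem.Chars.strip l.toList) st.toList = true
    · have hG : (sh == "vertex" &&
          PySem.Chars.startswith (PySem.Chars.strip l.toList) ['#','f','r','a','g','m','e','n','t']) = false := by
        by_cases hv : (sh == "vertex") = true
        · simp [hv, compat hv l hP]
        · simp_all
      simp only [hP, if_true, hG, Bool.not_false, List.filter_cons, Bool.not_true,
        Bool.false_eq_true, if_false, ih]
    · simp only [Bool.not_eq_true] at hP
      by_cases hG : (sh == "vertex" &&
          PySem.Chars.startswith (PySem.Chars.strip l.toList) ['#','f','r','a','g','m','e','n','t']) = true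
      · simp only [hP, Bool.false_eq_true, if_false, hG, if_true, Bool.not_true, List.filter_nil]
      · simp only [Bool.not_eq_true] at hG
        simp only [hP, Bool.false_eq_true, if_false, hG, if_true, Bool.not_false,
          List.filter_cons, ih]

-- A's loop with collecting = false, as B computes it
lemma loopA_false (st sh : String)
    (compat : (sh == "vertex") = true → ∀ l : String,
      PySem.Chars.startswith (PySem.Chars.strip l.toList) st.toList = true →
      PySem.Chars.startswith (PySem.Chars.strip l.toList) ['#','f','r','a','g','m','e','n','t'] = false)
    (xs : List String) :
    extractLoopA st sh xs false =
      (match (xs.takeWhile (fun l => !(sh == "vertex" &&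
          PySem.Chars.startswith (PySem.Chars.strip l.toList) ['#','f','r','a','g','m','e','n','t']))).findIdx?
          (fun l => PySem.Chars.startswith (PySem.Chars.strip l.toList) st.toList) with
       | none => []
       | some i =>
         ((xs.takeWhile (fun l => !(sh == "vertex" &&
            PySem.Chars.startswith (PySem.Chars.strip l.toList) ['#','f','r','a','g','m','e','n','t']))).drop (i + 1)).filter
           (fun l => !(PySem.Chars.startswith (PySem.Chars.strip l.toList) st.toList))) := by
  induction xs with
  | nil => simp [extractLoopA]
  | cons l rest ih =>
    simp only [extractLoopA]
    simp only [PySem.Str.startswith_eq, PySem.Str.toList_strip, fragToList, List.takeWhile_cons]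
    by_cases hP : PySem.Chars.startswith (PySem.Chars.strip l.toList) st.toList = true
    · have hG : (sh == "vertex" &&
          PySem.Chars.startswith (PySem.Chars.strip l.toList) ['#','f','r','a','g','m','e','n','t']) = false := by
        by_cases hv : (sh == "vertex") = true
        · simp [hv, compat hv l hP]
        · simp_all
      simp only [hP, if_true, hG, Bool.not_false, List.findIdx?_cons, List.drop_succ_cons,
        List.drop_zero, loopA_true st sh compat rest]
    · simp only [Bool.not_eq_true] at hP
      by_cases hG : (sh == "vertex" &&
          PySem.Chars.startswith (PySem.Chars.strip l.toList) ['#','f','r','a','g','m','e','n','t']) = true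
      · simp only [hP, Bool.false_eq_true, if_false, hG, if_true, Bool.not_true,
          List.findIdx?_nil]
      · simp only [Bool.not_eq_true] at hG
        simp only [hP, Bool.false_eq_true, if_false, hG, if_true, Bool.not_false,
          List.findIdx?_cons, ih]
        cases (rest.takeWhile (fun l => !(sh == "vertex" &&
            PySem.Chars.startswith (PySem.Chars.strip l.toList) ['#','f','r','a','g','m','e','n','t']))).findIdx?
            (fun l => PySem.Chars.startswith (PySem.Chars.strip l.toList) st.toList) with
        | none => simp
        | some j => simp [List.drop_succ_cons]

-- ===== VERDICT (by name: the statement is the Claim_ definition above) =====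
theorem extract_shader_spec : Claim_equal_extract_shader := by
  intro source shader_type _
  unfold Spec_extract_shader extract_shader extract_shader_alt
  have compat : (shader_type == "vertex") = true → ∀ l : String,
      PySem.Chars.startswith (PySem.Chars.strip l.toList)
        (String.ofList ('#' :: shader_type.toList)).toList = true →
      PySem.Chars.startswith (PySem.Chars.strip l.toList) ['#','f','r','a','g','m','e','n','t'] = false := by
    intro hv l hl
    have hsh : shader_type = "vertex" := by simpa using hv
    subst hsh
    have : (String.ofList ('#' :: ("vertex" : String).toList)).toList = ['#','v','e','r','t','e','x'] := by decide
    rw [this] at hl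
    exact vertex_not_fragment _ hl
  simp only [loopA_false _ _ compat, startLoopB_eq, fragLoopB_eq, Nat.sub_zero, Nat.add_zero,
    Option.map_map, Option.map_id']
  simp only [PySem.Str.startswith_eq, PySem.Str.toList_strip]
  have hTake : (PySem.Str.splitlines source).take
      (if (shader_type == "vertex") = true then
        ((PySem.Str.splitlines source).findIdx? (fun l =>
          PySem.Chars.startswith (PySem.Chars.strip l.toList) ['#','f','r','a','g','m','e','n','t'])).getD
          (PySem.Str.splitlines source).length
      else (PySem.Str.splitlines source).length) =
      (PySem.Str.splitlines source).takeWhile (fun l => !(shader_type == "vertex" &&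
        PySem.Chars.startswith (PySem.Chars.strip l.toList) ['#','f','r','a','g','m','e','n','t'])) := by
    by_cases hv : (shader_type == "vertex") = true
    · simp only [hv, if_true, take_findIdx_getD, Bool.true_and]
    · simp only [Bool.not_eq_true] at hv
      simp only [hv, Bool.false_eq_true, if_false, List.take_length, Bool.false_and,
        Bool.not_false]
      exact (List.takeWhile_eq_self_iff.mpr fun x _ => rfl).symm
  rw [hTake]
  cases h : List.findIdx? (fun l =>
      PySem.Chars.startswith (PySem.Chars.strip l.toList) (String.ofList ('#' :: shader_type.toList)).toList)
      (List.takeWhile (fun l => !(shader_type == "vertex" &&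
        PySem.Chars.startswith (PySem.Chars.strip l.toList) ['#','f','r','a','g','m','e','n','t']))
        (PySem.Str.splitlines source)) with
  | none => simp [PySem.Str.join]
  | some i => rfl
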